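-- pv_equiv track=rewrite | github.com/barswebadmin/BigAppleRecSports | bars-scripts/get_bday.py | extract_birthday_with_name
-- ===== SOURCE A (Python) =====
-- from typing import Dict, Any, List, Set
--
-- def extract_birthday_with_name(properties: List[Dict[str, str]]) -> List[tuple]:
--     """
--     Extract birthdays with associated names from properties.
--     Returns list of (birthday, first_name, last_name) tuples.
--     """
--     birthday = None
--     first_name = ""
--     last_name = ""
--
--     for prop in properties:
--         key = prop.get("key", "").lower()
--         value = prop.get("value", "").strip()
--
--         if "date of birth" in key and value:
--             birthday = value
--         elif "first name" in key and value and not first_name: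
--             first_name = value
--         elif "last name" in key and value and not last_name:
--             last_name = value
--
--     if birthday:
--         return [(birthday, first_name, last_name)]
--     return []
-- ===== SOURCE B (Python) =====
-- def _split_at_first(non):
--     """Split at the first entry whose key contains 'first name'.
--     Returns (prefix, pivot-or-None, suffix)."""
--     for i, (k, v) in enumerate(non):
--         if "first name" in k:
--             return non[:i], (k, v), non[i + 1:]
--     return non, None, []
--
--
-- def extract_birthday_with_name(properties):
--     # gather (key, value) pairs, keep only non-empty values
--     items = [(p.get("key", "").lower(), p.get("value", "").strip()) for p in properties]
--     items = [(k, v) for (k, v) in items if v]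
--     # birthday: last date-of-birth candidate
--     dob_vals = [v for (k, v) in items if "date of birth" in k]
--     # names come from the remaining entries; the first 'first name' entry is
--     # consumed for first_name and excluded from last_name candidates
--     non = [(k, v) for (k, v) in items if "date of birth" not in k]
--     pre, pivot, post = _split_at_first(non)
--     first_name = pivot[1] if pivot is not None else ""
--     last_vals = [v for (k, v) in pre + post if "last name" in k]
--     last_name = last_vals[0] if last_vals else ""
--     if dob_vals:
--         return [(dob_vals[-1], first_name, last_name)]
--     return []
-- ===== Notes on version B (the rewrite author's own statement) =====
-- stated objective: alternative
-- what changed: Replaces A's single pass over a running (birthday, first_name, last_name) state machine with a gather-then-select shape: filter/normalize all (key,value) pairs once, take the last date-of-birth candidate, split the non-birthday entries at the first 'first name' entry, and pick the first 'last name' candidate from the remainder.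
import Mathlib
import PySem

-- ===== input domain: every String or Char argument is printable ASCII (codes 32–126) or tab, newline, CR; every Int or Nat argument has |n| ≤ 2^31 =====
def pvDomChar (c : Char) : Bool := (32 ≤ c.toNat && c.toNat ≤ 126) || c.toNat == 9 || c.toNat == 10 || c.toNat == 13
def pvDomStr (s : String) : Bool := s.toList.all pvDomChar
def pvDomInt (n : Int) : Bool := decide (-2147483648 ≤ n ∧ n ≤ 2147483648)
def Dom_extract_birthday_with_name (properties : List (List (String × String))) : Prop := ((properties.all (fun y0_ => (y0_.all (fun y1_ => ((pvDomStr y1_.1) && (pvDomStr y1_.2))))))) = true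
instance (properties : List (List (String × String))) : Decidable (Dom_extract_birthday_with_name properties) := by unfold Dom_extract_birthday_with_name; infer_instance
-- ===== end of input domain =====

-- B replaces A's running-state single pass by a gather-then-select decomposition (same O(n) cost).


-- ===== PORT A =====
def extract_birthday_with_name (properties : List (List (String × String))) : List (String × String × String) :=
  let st := properties.foldl (fun (st : Option String × String × String) prop =>
    let key := PySem.Str.lower (PySem.Dict.getD (PySem.Dict.mk prop) "key" "")
    let value := PySem.Str.strip (PySem.Dict.getD (PySem.Dict.mk prop) "value" "")
    if PySem.Str.isIn "date of birth" key && value != "" then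
      (some value, st.2.1, st.2.2)
    else if PySem.Str.isIn "first name" key && value != "" && st.2.1 == "" then
      (st.1, value, st.2.2)
    else if PySem.Str.isIn "last name" key && value != "" && st.2.2 == "" then
      (st.1, st.2.1, value)
    else st) (none, "", "")
  match st.1 with
  | some b => if b != "" then [(b, st.2.1, st.2.2)] else []
  | none => []

-- ===== PORT B =====
-- helper of Source B: split at the first entry whose key contains "first name"
def pvSplitAtFirst (non : List (String × String)) :
    List (String × String) × Option (String × String) × List (String × String) :=
  match non with
  | [] => ([], none, [])
  | p :: t =>
    if PySem.Str.isIn "first name" p.1 then ([], some p, t)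
    else
      let r := pvSplitAtFirst t
      (p :: r.1, r.2.1, r.2.2)

def extract_birthday_with_name_alt (properties : List (List (String × String))) : List (String × String × String) :=
  let items0 := properties.map (fun p =>
    (PySem.Str.lower (PySem.Dict.getD (PySem.Dict.mk p) "key" ""),
     PySem.Str.strip (PySem.Dict.getD (PySem.Dict.mk p) "value" "")))
  let items := items0.filter (fun kv => kv.2 != "")
  let dobVals := (items.filter (fun kv => PySem.Str.isIn "date of birth" kv.1)).map Prod.snd
  let non := items.filter (fun kv => !PySem.Str.isIn "date of birth" kv.1)
  let s := pvSplitAtFirst non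
  let firstName := match s.2.1 with | some p => p.2 | none => ""
  let lastVals := ((s.1 ++ s.2.2).filter (fun kv => PySem.Str.isIn "last name" kv.1)).map Prod.snd
  let lastName := match lastVals with | v :: _ => v | [] => ""
  match dobVals.getLast? with
  | some b => [(b, firstName, lastName)]
  | none => []

-- ===== PRECONDITION & SPEC =====
def Spec_extract_birthday_with_name (properties : List (List (String × String))) (out : List (String × String × String)) : Prop := out = extract_birthday_with_name_alt properties
instance (properties : List (List (String × String))) (out : List (String × String × String)) : Decidable (Spec_extract_birthday_with_name properties out) := by unfold Spec_extract_birthday_with_name; infer_instance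

-- ===== CLAIM (what is proved, stated in full; the proofs are below) =====
def Claim_equal_extract_birthday_with_name : Prop := ∀ (properties : List (List (String × String))), Dom_extract_birthday_with_name properties → Spec_extract_birthday_with_name properties (extract_birthday_with_name properties)

-- ===== LEMMAS AND PROOFS =====

-- the per-pair step of A's loop, on an already-normalized (key, value) pair
def pvStepA (st : Option String × String × String) (kv : String × String) :
    Option String × String × String :=
  if PySem.Str.isIn "date of birth" kv.1 && kv.2 != "" then
    (some kv.2, st.2.1, st.2.2)
  else if PySem.Str.isIn "first name" kv.1 && kv.2 != "" && st.2.1 == "" then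
    (st.1, kv.2, st.2.2)
  else if PySem.Str.isIn "last name" kv.1 && kv.2 != "" && st.2.2 == "" then
    (st.1, st.2.1, kv.2)
  else st

def pvFirstLastOf (xs : List (String × String)) : String :=
  match (xs.filter (fun kv => PySem.Str.isIn "last name" kv.1)).map Prod.snd with
  | v :: _ => v
  | [] => ""

def pvChooseLast (ds : List String) (o : Option String) : Option String :=
  match ds.getLast? with
  | some x => some x
  | none => o

-- gather-then-select characterization of A's fold from an arbitrary state
def pvG (items : List (String × String)) (st : Option String × String × String) :
    Option String × String × String :=
  let items' := items.filter (fun kv => kv.2 != "")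
  let b' := pvChooseLast ((items'.filter (fun kv => PySem.Str.isIn "date of birth" kv.1)).map Prod.snd) st.1
  let non := items'.filter (fun kv => !PySem.Str.isIn "date of birth" kv.1)
  if st.2.1 != "" then
    (b', st.2.1, if st.2.2 != "" then st.2.2 else pvFirstLastOf non)
  else
    let s := pvSplitAtFirst non
    (b', (match s.2.1 with | some p => p.2 | none => ""),
     if st.2.2 != "" then st.2.2 else pvFirstLastOf (s.1 ++ s.2.2))

theorem pvChooseLast_cons (v : String) (ds : List String) (o : Option String) :
    pvChooseLast (v :: ds) o = pvChooseLast ds (some v) := by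
  unfold pvChooseLast
  rcases h : ds.getLast? with _ | x
  · simp [List.getLast?_cons, h]
  · simp [List.getLast?_cons, h]

theorem pvFold_eq_pvG (items : List (String × String)) :
    ∀ st, items.foldl pvStepA st = pvG items st := by
  induction items with
  | nil =>
    intro st
    unfold pvG pvChooseLast pvFirstLastOf
    simp only [List.foldl_nil, List.filter_nil, List.map_nil, List.getLast?_nil]
    rcases st with ⟨b, f, l⟩
    by_cases hf : f = "" <;> by_cases hl : l = "" <;>
      simp [pvSplitAtFirst, hf, hl]
  | cons kv t ih =>
    intro st
    rcases st with ⟨b, f, l⟩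
    rw [List.foldl_cons, ih]
    clear ih
    by_cases hv : kv.2 = "" <;>
      by_cases hd : PySem.Str.isIn "date of birth" kv.1 <;>
      by_cases hfst : PySem.Str.isIn "first name" kv.1 <;>
      by_cases hlst : PySem.Str.isIn "last name" kv.1 <;>
      by_cases hf : f = "" <;>
      by_cases hl : l = "" <;>
      (unfold pvStepA pvG; simp_all [pvChooseLast_cons, pvSplitAtFirst, pvFirstLastOf])

-- normalized (key, value) of one property dict
def pvKV (p : List (String × String)) : String × String :=
  (PySem.Str.lower (PySem.Dict.getD (PySem.Dict.mk p) "key" ""),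
   PySem.Str.strip (PySem.Dict.getD (PySem.Dict.mk p) "value" ""))

theorem pvChooseLast_none (ds : List String) : pvChooseLast ds none = ds.getLast? := by
  unfold pvChooseLast
  cases h : ds.getLast? <;> simp

theorem pvOutA_eq (props : List (List (String × String))) :
    extract_birthday_with_name props =
      (let st := pvG (props.map pvKV) (none, "", "")
       match st.1 with
       | some b => if b != "" then [(b, st.2.1, st.2.2)] else []
       | none => []) := by
  unfold extract_birthday_with_name
  rw [← pvFold_eq_pvG, List.foldl_map]
  rfl

theorem pvOutB_eq (props : List (List (String × String))) :
    extract_birthday_with_name_alt props =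
      (let st := pvG (props.map pvKV) (none, "", "")
       match st.1 with
       | some b => [(b, st.2.1, st.2.2)]
       | none => []) := by
  unfold extract_birthday_with_name_alt pvG pvKV pvFirstLastOf
  simp only [pvChooseLast_none]
  rfl

theorem pvG_fst_ne_empty (props : List (List (String × String))) (bv : String)
    (h : (pvG (props.map pvKV) (none, "", "")).1 = some bv) : bv ≠ "" := by
  have h' : (((props.map pvKV).filter (fun kv => kv.2 != "")).filter
      (fun kv => PySem.Str.isIn "date of birth" kv.1) |>.map Prod.snd).getLast? = some bv := by
    rw [← pvChooseLast_none]
    exact h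
  have hmem := List.mem_of_getLast? h'
  rcases List.mem_map.1 hmem with ⟨kv, hkv, hsnd⟩
  have hkv2 := List.mem_filter.1 (List.mem_filter.1 hkv).1
  have : (kv.2 != "") = true := hkv2.2
  simp only [bne_iff_ne, ne_eq] at this
  rw [← hsnd]
  exact this

-- ===== VERDICT (by name: the statement is the Claim_ definition above) =====
theorem extract_birthday_with_name_spec : Claim_equal_extract_birthday_with_name := by
  intro properties _
  unfold Spec_extract_birthday_with_name
  rw [pvOutA_eq, pvOutB_eq]
  rcases h1 : (pvG (properties.map pvKV) (none, "", "")).1 with _ | bv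
  · simp [h1]
  · have hb := pvG_fst_ne_empty properties bv h1
    simp [h1, hb]
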